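-- pv_equiv track=rewrite | github.com/zuquan-song/leetcode | python/citidel/throttling_gateway.py | droppedRequest
-- ===== SOURCE A (Python) =====
-- from collections import Counter
--
-- def droppedRequest(requestTime):
--     if not requestTime or len(requestTime) == 0:
--         return 0
--
--     rules = [[1, 3], [10, 20], [60, 60]]
--     dropped = set()
--     maximum = max(requestTime)
--     dic = Counter(requestTime)
--
--     presum = [0] * (maximum + 1)
--     for i in range(1, maximum + 1):
--         presum[i] = presum[i-1] + dic.get(i, 0)
--
--     for rule in rules:
--         window = min(rule[0], maximum)
--         for i in range(maximum - window + 1):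
--             numRequest = presum[i + window] - presum[i]
--             diff = max(0, numRequest - rule[1])
--             for index in range(diff):
--                 endIndex = presum[i + window] - 1
--                 dropped.add(endIndex - index)
--
--     return len(dropped)
-- ===== SOURCE B (Python) =====
-- def droppedRequest(requestTime):
--     # Timestamps < 1 lie before the throttling timeline (windows cover seconds 1..max), as in A.
--     ts = sorted(t for t in requestTime if t >= 1)
--     dropped = 0
--     for p, t in enumerate(ts):
--         if (p >= 3 and t - ts[p - 3] < 1) or \
--            (p >= 20 and t - ts[p - 20] < 10) or \
--            (p >= 60 and t - ts[p - 60] < 60):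
--             dropped += 1
--     return dropped
-- ===== Notes on version B (the rewrite author's own statement) =====
-- stated objective: faster
-- what changed: Instead of building a prefix-sum array over all integer times up to max(requestTime) and scanning every integer window position marking excess request indices into a set, B sorts the timestamps once and, for each position p, checks each fixed rule (w,lim) by comparing ts[p] with ts[p-lim] (a fixed-offset sliding comparison), counting drops directly.
import Mathlib
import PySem

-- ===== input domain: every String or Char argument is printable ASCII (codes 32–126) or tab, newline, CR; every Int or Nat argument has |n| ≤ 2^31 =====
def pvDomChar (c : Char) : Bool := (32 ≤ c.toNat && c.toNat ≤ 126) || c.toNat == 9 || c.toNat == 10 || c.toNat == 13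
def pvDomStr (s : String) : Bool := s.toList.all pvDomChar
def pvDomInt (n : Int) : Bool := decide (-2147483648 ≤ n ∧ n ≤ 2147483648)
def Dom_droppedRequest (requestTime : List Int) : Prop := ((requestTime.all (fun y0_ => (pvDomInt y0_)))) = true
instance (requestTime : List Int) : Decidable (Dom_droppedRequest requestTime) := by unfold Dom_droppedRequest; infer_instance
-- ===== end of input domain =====

-- B replaces A's O(maxTime)-sized prefix-sum array and per-integer-window marking with one sort
-- and a fixed-offset comparison per position (objective: faster, asymptotic).

-- ===== PORT A =====
-- presum[i] = ... is written into a pre-allocated zero list; i ≥ 1 in the loop, so `i.toNat` is exact.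
-- In-range reads presum[i-1], presum[i+window], presum[i] are ported with pyGetD (indices are in range
-- wherever Python does not raise; the all-negative-input IndexError case is excluded by Pre_ below).
def droppedRequest (requestTime : List Int) : Int :=
  if requestTime = [] then 0
  else
    let rules : List (Int × Int) := [(1, 3), (10, 20), (60, 60)]
    let maximum : Int := (PySem.List.max? requestTime (fun x => x)).getD 0
    let dic : PySem.Dict Int Int := PySem.Dict.counter requestTime
    let presum : List Int :=
      (PySem.List.pyRange 1 (maximum + 1) 1).foldl
        (fun ps i => ps.set i.toNat (PySem.List.pyGetD ps (i - 1) 0 + dic.getD i 0))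
        (List.replicate (maximum + 1).toNat 0)
    let dropped : PySem.Set Int :=
      rules.foldl (fun dr rule =>
        let window := min rule.1 maximum
        (PySem.List.pyRange 0 (maximum - window + 1) 1).foldl (fun dr i =>
          let numRequest := PySem.List.pyGetD presum (i + window) 0 - PySem.List.pyGetD presum i 0
          let diff := max 0 (numRequest - rule.2)
          (PySem.List.pyRange 0 diff 1).foldl (fun dr index =>
            let endIndex := PySem.List.pyGetD presum (i + window) 0 - 1
            PySem.Set.add dr (endIndex - index)) dr) dr) PySem.Set.empty
    (PySem.Set.len dropped : Int)

-- ===== PORT B =====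
-- ts[p - lim] is read only under the guard lim ≤ p < len(ts), so pyGetD is exact there.
def droppedRequest_alt (requestTime : List Int) : Int :=
  let ts : List Int := PySem.List.sorted (requestTime.filter (fun t => decide (1 ≤ t))) (fun x => x) false
  (PySem.List.enumerate ts 0).foldl (fun dropped pt =>
    if (3 ≤ pt.1 ∧ pt.2 - PySem.List.pyGetD ts (pt.1 - 3) 0 < 1) ∨
       (20 ≤ pt.1 ∧ pt.2 - PySem.List.pyGetD ts (pt.1 - 20) 0 < 10) ∨
       (60 ≤ pt.1 ∧ pt.2 - PySem.List.pyGetD ts (pt.1 - 60) 0 < 60)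
    then dropped + 1 else dropped) 0

-- ===== PRECONDITION & SPEC =====
-- Pre_ excludes exactly the inputs on which A raises IndexError: a nonempty list whose every
-- element is negative (then presum = [] but presum[-1] is read).
def Pre_droppedRequest (requestTime : List Int) : Prop :=
  requestTime = [] ∨ ∃ x ∈ requestTime, 0 ≤ x
instance (requestTime : List Int) : Decidable (Pre_droppedRequest requestTime) := by
  unfold Pre_droppedRequest; infer_instance
def pvWitness_droppedRequest : List Int := [2, 1, 2, 2, 2, 7]

def Spec_droppedRequest (requestTime : List Int) (out : Int) : Prop := out = droppedRequest_alt requestTime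
instance (requestTime : List Int) (out : Int) : Decidable (Spec_droppedRequest requestTime out) := by unfold Spec_droppedRequest; infer_instance

-- ===== CLAIM (what is proved, stated in full; the proofs are below) =====
def Claim_equal_droppedRequest : Prop := ∀ (requestTime : List Int), Dom_droppedRequest requestTime → Pre_droppedRequest requestTime → Spec_droppedRequest requestTime (droppedRequest requestTime)
-- ===== LEMMAS AND PROOFS =====

-- proof-side abbreviations
def tsOf (l : List Int) : List Int :=
  PySem.List.sorted (l.filter (fun t => decide (1 ≤ t))) (fun x => x) false

def cntOf (l : List Int) (t : Int) : Int := ((tsOf l).countP (fun y => decide (y ≤ t)) : Int)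

-- membership through a set-building fold
theorem mem_foldl_iff {α : Type} (g : PySem.Set Int → α → PySem.Set Int) (Q : α → Int → Prop)
    (hg : ∀ s i x, x ∈ g s i ↔ x ∈ s ∨ Q i x) (l : List α) :
    ∀ (s : PySem.Set Int) (x : Int), x ∈ l.foldl g s ↔ x ∈ s ∨ ∃ i ∈ l, Q i x := by
  induction l with
  | nil => simp
  | cons a t ih =>
    intro s x
    simp only [List.foldl_cons, ih, hg, List.mem_cons]
    constructor
    · rintro ((h | h) | ⟨i, hi, hq⟩)
      · exact Or.inl h
      · exact Or.inr ⟨a, Or.inl rfl, h⟩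
      · exact Or.inr ⟨i, Or.inr hi, hq⟩
    · rintro (h | ⟨i, (rfl | hi), hq⟩)
      · exact Or.inl (Or.inl h)
      · exact Or.inl (Or.inr hq)
      · exact Or.inr ⟨i, hi, hq⟩

-- a fold that only performs Set.add keeps Nodup
theorem nodup_foldl {α : Type} (g : PySem.Set Int → α → PySem.Set Int)
    (hg : ∀ s i, s.Nodup → (g s i).Nodup) (l : List α) :
    ∀ s : PySem.Set Int, s.Nodup → (l.foldl g s).Nodup := by
  induction l with
  | nil => simpa using fun s h => h
  | cons a t ih => intro s hs; exact ih _ (hg s a hs)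

-- countP (· ≤ i) splits off count i
theorem countP_le_split (l : List Int) (i : Int) :
    l.countP (fun y => decide (y ≤ i)) = l.countP (fun y => decide (y ≤ i - 1)) + l.count i := by
  induction l with
  | nil => simp
  | cons a t ih =>
    simp only [List.countP_cons, List.count_cons, ih, beq_iff_eq, decide_eq_true_eq]
    split_ifs <;> omega

-- sorted characterisation: position j holds a value ≤ t iff j is below the count of values ≤ t
theorem sorted_count_char (ts : List Int) (hs : ts.Pairwise (· ≤ ·)) (t : Int) :
    ∀ j : Nat, (hj : j < ts.length) →
      (ts[j] ≤ t ↔ j < ts.countP (fun y => decide (y ≤ t))) := by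
  induction ts with
  | nil => intro j hj; simp at hj
  | cons a l ih =>
    intro j hj
    have hpl : l.Pairwise (· ≤ ·) := (List.pairwise_cons.mp hs).2
    have hal : ∀ y ∈ l, a ≤ y := (List.pairwise_cons.mp hs).1
    by_cases hat : a ≤ t
    · cases j with
      | zero => simpa [List.countP_cons, hat] using Nat.succ_pos _
      | succ j =>
        have hj' : j < l.length := by simpa using hj
        have := ih hpl j hj'
        simpa [List.countP_cons, hat, Nat.succ_lt_succ_iff] using this
    · have hzero : l.countP (fun y => decide (y ≤ t)) = 0 := by
        apply List.countP_eq_zero.mpr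
        intro y hy
        simp only [decide_eq_true_eq]
        have := hal y hy
        omega
      cases j with
      | zero => simpa [List.countP_cons, hat, hzero] using hat
      | succ j =>
        have hj' : j < l.length := by simpa using hj
        have hyt : ¬ (l[j] ≤ t) := by
          have := hal l[j] (List.getElem_mem hj')
          omega
        simpa [List.countP_cons, hat, hzero] using hyt

-- the prefix-sum building loop of A computes f on 0..M
theorem presum_aux (M : Int) (hM : 0 ≤ M) (c f : Int → Int) (h0 : f 0 = 0)
    (hrec : ∀ i : Int, 1 ≤ i → f i = f (i - 1) + c i) :
    ∀ k : Nat, (k : Int) ≤ M →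
      (PySem.List.pyRange 1 (1 + (k : Int)) 1).foldl
          (fun ps i => ps.set i.toNat (PySem.List.pyGetD ps (i - 1) 0 + c i))
          (List.replicate (M + 1).toNat 0)
        = (PySem.List.pyRange 0 (1 + (k : Int)) 1).map f ++ List.replicate (M - k).toNat 0 := by
  intro k
  induction k with
  | zero =>
    intro _
    rw [show ((0:Nat):Int) = 0 by simp] at *
    rw [PySem.List.pyRange_one_eq_nil (by omega), show (1 + (0:Int)) = 0 + 1 by ring,
      PySem.List.pyRange_one_singleton]
    have h1 : (M + 1).toNat = M.toNat + 1 := by omega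
    have h2 : (M - 0).toNat = M.toNat := by omega
    simp [h1, List.replicate_succ, h0, List.foldl_nil]
  | succ k ih =>
    intro hk1
    have hk : (k : Int) ≤ M := by push_cast at hk1 ⊢; omega
    have hcast : (1 + ((k+1 : Nat) : Int)) = (1 + (k : Int)) + 1 := by push_cast; ring
    rw [hcast, PySem.List.pyRange_one_succ_right (a := 1) (by omega),
      PySem.List.pyRange_one_succ_right (a := 0) (by omega), List.foldl_append, ih hk]
    set A := (PySem.List.pyRange 0 (1 + (k : Int)) 1).map f with hA
    have hAlen : A.length = k + 1 := by
      simp [hA, PySem.List.length_pyRange_one]; omega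
    have hrep : (M - (k:Int)).toNat = (M - ((k+1 : Nat) : Int)).toNat + 1 := by
      push_cast; push_cast at hk1; omega
    have hget : PySem.List.pyGetD (A ++ List.replicate (M - (k:Int)).toNat 0) (1 + (k:Int) - 1) 0
        = f (k : Int) := by
      have hlt : (1 + (k:Int) - 1) < ((A ++ List.replicate (M - (k:Int)).toNat 0).length : Int) := by
        simp [hAlen]; omega
      rw [PySem.List.pyGetD_eq_getElem _ _ (by omega) hlt]
      have hidx : (1 + (k:Int) - 1).toNat = k := by omega
      simp only [hidx]
      rw [List.getElem_append_left (by omega)]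
      simp [hA, List.getElem_map, PySem.List.getElem_pyRange_one]
    simp only [List.foldl_cons, List.foldl_nil, hget]
    have hset : (1 + (k:Int)).toNat = A.length := by simp [hAlen]; omega
    rw [hset, List.set_append_right _ _ (le_refl _), Nat.sub_self, hrep, List.replicate_succ]
    have hval : f (k:Int) + c (1 + (k:Int)) = f (1 + (k:Int)) := by
      have := hrec (1 + (k:Int)) (by omega)
      simp only [show (1 + (k:Int) - 1) = (k:Int) by ring] at this
      omega
    simp only [List.set_cons_zero, List.map_append, List.map_cons, List.map_nil, hval]
    simp only [← hA]
    simp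

theorem presum_spec (M : Int) (hM : 0 ≤ M) (c f : Int → Int) (h0 : f 0 = 0)
    (hrec : ∀ i : Int, 1 ≤ i → f i = f (i - 1) + c i) :
    (PySem.List.pyRange 1 (M + 1) 1).foldl
        (fun ps i => ps.set i.toNat (PySem.List.pyGetD ps (i - 1) 0 + c i))
        (List.replicate (M + 1).toNat 0)
      = (PySem.List.pyRange 0 (M + 1) 1).map f := by
  have h := presum_aux M hM c f h0 hrec M.toNat (by omega)
  rw [show (1 + (M.toNat : Int)) = M + 1 by omega] at h
  rw [h, show (M - (M.toNat : Int)).toNat = 0 by omega]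
  simp

-- the analytic core: a position x is coverable by some window of the rule iff the fixed-offset test holds
theorem rule_char (ts : List Int) (M w lim : Int) (hs : ts.Pairwise (· ≤ ·))
    (hpos : ∀ y ∈ ts, 1 ≤ y) (hle : ∀ y ∈ ts, y ≤ M) (hM : 0 ≤ M) (hw : 1 ≤ w) (hlim : 1 ≤ lim)
    (x : Int) :
    (∃ i, (0 ≤ i ∧ i < M - min w M + 1) ∧
        ((ts.countP (fun y => decide (y ≤ i)) : Int) + lim ≤ x ∧
          x ≤ (ts.countP (fun y => decide (y ≤ i + min w M)) : Int) - 1))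
      ↔ (0 ≤ x ∧ x < (ts.length : Int) ∧ lim ≤ x ∧
          PySem.List.pyGetD ts x 0 - PySem.List.pyGetD ts (x - lim) 0 < w) := by
  have hlen : ∀ t : Int, ((ts.countP (fun y => decide (y ≤ t)) : Nat) : Int) ≤ (ts.length : Int) := by
    intro t; exact_mod_cast List.countP_le_length (l := ts)
  have hmono : ∀ t t' : Int, t ≤ t' →
      ((ts.countP (fun y => decide (y ≤ t)) : Nat) : Int) ≤ ((ts.countP (fun y => decide (y ≤ t')) : Nat) : Int) := by
    intro t t' h
    have : ts.countP (fun y => decide (y ≤ t)) ≤ ts.countP (fun y => decide (y ≤ t')) := by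
      apply List.countP_mono_left
      intro a _ ha
      simp only [decide_eq_true_eq] at ha ⊢
      omega
    exact_mod_cast this
  constructor
  · rintro ⟨i, ⟨hi0, hiM⟩, hxl, hxr⟩
    have hc0 : (0:Int) ≤ ((ts.countP (fun y => decide (y ≤ i)) : Nat) : Int) := by positivity
    have hx0 : 0 ≤ x := by omega
    have hxn : x < (ts.length : Int) := by have := hlen (i + min w M); omega
    have hpn : x.toNat < ts.length := by omega
    have hqn : (x - lim).toNat < ts.length := by omega
    have hts_p : ts[x.toNat] ≤ i + min w M := by
      apply (sorted_count_char ts hs (i + min w M) x.toNat hpn).mpr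
      omega
    have hts_q : ¬ (ts[(x - lim).toNat] ≤ i) := by
      intro h
      have := (sorted_count_char ts hs i (x - lim).toNat hqn).mp h
      omega
    refine ⟨hx0, hxn, by omega, ?_⟩
    rw [PySem.List.pyGetD_eq_getElem ts 0 hx0 hxn,
      PySem.List.pyGetD_eq_getElem ts 0 (by omega) (by omega)]
    omega
  · rintro ⟨hx0, hxn, hlx, hdiff⟩
    have hpn : x.toNat < ts.length := by omega
    have hqn : (x - lim).toNat < ts.length := by omega
    rw [PySem.List.pyGetD_eq_getElem ts 0 hx0 hxn,
      PySem.List.pyGetD_eq_getElem ts 0 (by omega) (by omega)] at hdiff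
    have h1p : 1 ≤ ts[x.toNat] := hpos _ (List.getElem_mem hpn)
    have hpM : ts[x.toNat] ≤ M := hle _ (List.getElem_mem hpn)
    have h1q : 1 ≤ ts[(x - lim).toNat] := hpos _ (List.getElem_mem hqn)
    have hqM : ts[(x - lim).toNat] ≤ M := hle _ (List.getElem_mem hqn)
    refine ⟨max 0 (ts[x.toNat] - min w M), ⟨by omega, by omega⟩, ?_, ?_⟩
    · have hm1 := hmono (max 0 (ts[x.toNat] - min w M)) (ts[(x - lim).toNat] - 1) (by omega)
      have hch : ¬ ((x - lim).toNat < ts.countP (fun y => decide (y ≤ ts[(x - lim).toNat] - 1))) := by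
        intro h
        have := (sorted_count_char ts hs (ts[(x - lim).toNat] - 1) (x - lim).toNat hqn).mpr h
        omega
      omega
    · have hm2 := hmono (ts[x.toNat]) (max 0 (ts[x.toNat] - min w M) + min w M) (by omega)
      have hch : x.toNat < ts.countP (fun y => decide (y ≤ ts[x.toNat])) :=
        (sorted_count_char ts hs (ts[x.toNat]) x.toNat hpn).mp (le_refl _)
      omega

-- B's per-position test, as a Bool predicate on the index
def condB (ts : List Int) (j : Int) : Bool :=
  decide ((3 ≤ j ∧ PySem.List.pyGetD ts j 0 - PySem.List.pyGetD ts (j - 3) 0 < 1) ∨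
    (20 ≤ j ∧ PySem.List.pyGetD ts j 0 - PySem.List.pyGetD ts (j - 20) 0 < 10) ∨
    (60 ≤ j ∧ PySem.List.pyGetD ts j 0 - PySem.List.pyGetD ts (j - 60) 0 < 60))

theorem alt_eq_countP (l : List Int) :
    droppedRequest_alt l =
      (((List.range (tsOf l).length).countP (fun p : Nat => condB (tsOf l) ((p : Nat) : Int)) : Nat) : Int) := by
  have h : droppedRequest_alt l = List.foldl
      (fun dropped pt =>
        if (3 ≤ pt.1 ∧ pt.2 - PySem.List.pyGetD (tsOf l) (pt.1 - 3) 0 < 1) ∨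
           (20 ≤ pt.1 ∧ pt.2 - PySem.List.pyGetD (tsOf l) (pt.1 - 20) 0 < 10) ∨
           (60 ≤ pt.1 ∧ pt.2 - PySem.List.pyGetD (tsOf l) (pt.1 - 60) 0 < 60)
        then dropped + 1 else dropped) 0 (PySem.List.enumerate (tsOf l)) := rfl
  rw [h, PySem.List.enumerate_eq_map_pyRange (tsOf l) (0 : Int), List.foldl_map]
  rw [PySem.List.foldl_ite_add_one
    (p := fun j : Int => (3 ≤ j ∧ PySem.List.pyGetD (tsOf l) j 0 - PySem.List.pyGetD (tsOf l) (j - 3) 0 < 1) ∨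
      (20 ≤ j ∧ PySem.List.pyGetD (tsOf l) j 0 - PySem.List.pyGetD (tsOf l) (j - 20) 0 < 10) ∨
      (60 ≤ j ∧ PySem.List.pyGetD (tsOf l) j 0 - PySem.List.pyGetD (tsOf l) (j - 60) 0 < 60))]
  rw [show PySem.List.len (tsOf l) = (((tsOf l).length : Nat) : Int) from by simp [PySem.List.len_eq],
    PySem.List.pyRange_zero_natCast, List.countP_map]
  simp only [zero_add, Int.natCast_inj]
  apply List.countP_congr
  intro p _
  simp [condB, Function.comp]

-- proof-side names for the pieces of A (definitionally equal to the port's lets)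
def presumOf (l : List Int) (M : Int) : List Int :=
  (PySem.List.pyRange 1 (M + 1) 1).foldl
    (fun ps i => ps.set i.toNat (PySem.List.pyGetD ps (i - 1) 0 + (PySem.Dict.counter l).getD i 0))
    (List.replicate (M + 1).toNat 0)

def wfold (ps : List Int) (M w lim : Int) (s : PySem.Set Int) : PySem.Set Int :=
  (PySem.List.pyRange 0 (M - min w M + 1) 1).foldl (fun dr i =>
    (PySem.List.pyRange 0 (max 0 (PySem.List.pyGetD ps (i + min w M) 0 - PySem.List.pyGetD ps i 0 - lim)) 1).foldl
      (fun dr k => PySem.Set.add dr (PySem.List.pyGetD ps (i + min w M) 0 - 1 - k)) dr) s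

theorem a_unfold (l : List Int) (hne : l ≠ []) :
    droppedRequest l =
      ((PySem.Set.len (wfold (presumOf l ((PySem.List.max? l (fun x => x)).getD 0))
          ((PySem.List.max? l (fun x => x)).getD 0) 60 60
          (wfold (presumOf l ((PySem.List.max? l (fun x => x)).getD 0))
            ((PySem.List.max? l (fun x => x)).getD 0) 10 20
            (wfold (presumOf l ((PySem.List.max? l (fun x => x)).getD 0))
              ((PySem.List.max? l (fun x => x)).getD 0) 1 3 PySem.Set.empty)))) : Int) := by
  unfold droppedRequest wfold presumOf
  rw [if_neg hne]
  rfl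


theorem mem_wfold (ps : List Int) (M w lim : Int) (s : PySem.Set Int) (x : Int) :
    x ∈ wfold ps M w lim s ↔ x ∈ s ∨ ∃ i, (0 ≤ i ∧ i < M - min w M + 1) ∧
      (PySem.List.pyGetD ps i 0 + lim ≤ x ∧ x ≤ PySem.List.pyGetD ps (i + min w M) 0 - 1) := by
  unfold wfold
  rw [mem_foldl_iff _ (fun i x => PySem.List.pyGetD ps i 0 + lim ≤ x ∧
      x ≤ PySem.List.pyGetD ps (i + min w M) 0 - 1) ?_ _ s x]
  · constructor
    · rintro (h | ⟨i, hi, hq⟩)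
      · exact Or.inl h
      · exact Or.inr ⟨i, by simpa [PySem.List.mem_pyRange_one] using hi, hq⟩
    · rintro (h | ⟨i, hi, hq⟩)
      · exact Or.inl h
      · exact Or.inr ⟨i, by simp [PySem.List.mem_pyRange_one]; omega, hq⟩
  · intro s i x
    rw [mem_foldl_iff _ (fun k x => x = PySem.List.pyGetD ps (i + min w M) 0 - 1 - k)
        (fun s k x => PySem.Set.mem_add s _ x) _ s x]
    constructor
    · rintro (h | ⟨k, hk, rfl⟩)
      · exact Or.inl h
      · rw [PySem.List.mem_pyRange_one] at hk
        exact Or.inr (by omega)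
    · rintro (h | ⟨h1, h2⟩)
      · exact Or.inl h
      · refine Or.inr ⟨PySem.List.pyGetD ps (i + min w M) 0 - 1 - x, ?_, by ring⟩
        rw [PySem.List.mem_pyRange_one]
        omega

theorem nodup_wfold (ps : List Int) (M w lim : Int) (s : PySem.Set Int) (hs : s.Nodup) :
    (wfold ps M w lim s).Nodup := by
  unfold wfold
  refine nodup_foldl _ ?_ _ _ hs
  intro s' i hs'
  refine nodup_foldl _ ?_ _ _ hs'
  intro s'' k hs''
  exact PySem.Set.nodup_add _ _ hs''

theorem tsOf_pairwise (l : List Int) : (tsOf l).Pairwise (· ≤ ·) :=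
  PySem.List.sorted_pairwise _ _

theorem tsOf_pos (l : List Int) : ∀ y ∈ tsOf l, 1 ≤ y := by
  intro y hy
  have hy' := (PySem.List.mem_sorted _ _ _ _).mp hy
  simp only [List.mem_filter, decide_eq_true_eq] at hy'
  exact hy'.2

theorem tsOf_mem (l : List Int) : ∀ y ∈ tsOf l, y ∈ l := by
  intro y hy
  have hy' := (PySem.List.mem_sorted _ _ _ _).mp hy
  simp only [List.mem_filter] at hy'
  exact hy'.1

theorem tsOf_count (l : List Int) (i : Int) (hi : 1 ≤ i) : (tsOf l).count i = l.count i := by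
  have hperm : (tsOf l).Perm (l.filter (fun t => decide (1 ≤ t))) := PySem.List.sorted_perm _ _ _
  rw [hperm.count_eq, List.count_filter]
  simp [hi]

theorem cntOf_zero (l : List Int) : cntOf l 0 = 0 := by
  unfold cntOf
  have : (tsOf l).countP (fun y => decide (y ≤ (0:Int))) = 0 := by
    apply List.countP_eq_zero.mpr
    intro y hy
    have := tsOf_pos l y hy
    simp only [decide_eq_true_eq]
    omega
  simp [this]

theorem cntOf_rec (l : List Int) (i : Int) (hi : 1 ≤ i) :
    cntOf l i = cntOf l (i - 1) + (PySem.Dict.counter l).getD i 0 := by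
  unfold cntOf
  rw [PySem.Dict.getD_counter, ← tsOf_count l i hi, countP_le_split]
  push_cast
  ring

theorem a_eq_countP (l : List Int) (hne : l ≠ []) (hpre : ∃ x ∈ l, 0 ≤ x) :
    droppedRequest l =
      (((List.range (tsOf l).length).countP (fun p : Nat => condB (tsOf l) ((p : Nat) : Int)) : Nat) : Int) := by
  obtain ⟨m, hm⟩ : ∃ m, PySem.List.max? l (fun x => x) = some m := by
    cases l with
    | nil => exact absurd rfl hne
    | cons a t => exact ⟨t.foldl max a, PySem.List.max?_id_cons a t⟩
  have hmax : ∀ y ∈ l, y ≤ m := PySem.List.max?_isMax hm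
  obtain ⟨x0, hx0l, hx00⟩ := hpre
  have hm0 : 0 ≤ m := le_trans hx00 (hmax _ hx0l)
  rw [a_unfold l hne, hm]
  simp only [Option.getD_some]
  have hps : presumOf l m = (PySem.List.pyRange 0 (m + 1) 1).map (cntOf l) := by
    unfold presumOf
    exact presum_spec m hm0 _ _ (cntOf_zero l) (fun i hi => cntOf_rec l i hi)
  have hP : ∀ t : Int, 0 ≤ t → t ≤ m →
      PySem.List.pyGetD (presumOf l m) t 0 = cntOf l t := by
    intro t h0 h1
    rw [hps, show t = ((t.toNat : Nat) : Int) from by omega,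
      show m + 1 = (((m + 1).toNat : Nat) : Int) from by omega]
    rw [PySem.List.pyGetD_map_pyRange (cntOf l) (m+1).toNat t.toNat 0 (by omega)]
  simp only [cntOf] at hP
  -- characterisation of one rule's contribution, in terms of the sorted list
  have hrule : ∀ w lim : Int, 1 ≤ w → 1 ≤ lim →
      ∀ x : Int, (∃ i, (0 ≤ i ∧ i < m - min w m + 1) ∧
          (PySem.List.pyGetD (presumOf l m) i 0 + lim ≤ x ∧
            x ≤ PySem.List.pyGetD (presumOf l m) (i + min w m) 0 - 1))
        ↔ (0 ≤ x ∧ x < ((tsOf l).length : Int) ∧ lim ≤ x ∧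
            PySem.List.pyGetD (tsOf l) x 0 - PySem.List.pyGetD (tsOf l) (x - lim) 0 < w) := by
    intro w lim hw hlim x
    rw [← rule_char (tsOf l) m w lim (tsOf_pairwise l) (tsOf_pos l)
      (fun y hy => hmax y (tsOf_mem l y hy)) hm0 hw hlim x]
    constructor
    · rintro ⟨i, hi, hc⟩
      rw [hP i (by omega) (by omega), hP (i + min w m) (by omega) (by omega)] at hc
      exact ⟨i, hi, hc⟩
    · rintro ⟨i, hi, hc⟩
      rw [← hP i (by omega) (by omega), ← hP (i + min w m) (by omega) (by omega)] at hc
      exact ⟨i, hi, hc⟩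
  set S := wfold (presumOf l m) m 60 60 (wfold (presumOf l m) m 10 20
    (wfold (presumOf l m) m 1 3 PySem.Set.empty)) with hS
  have hSnodup : S.Nodup :=
    nodup_wfold _ _ _ _ _ (nodup_wfold _ _ _ _ _ (nodup_wfold _ _ _ _ _ List.nodup_nil))
  set L : List Int := ((List.range (tsOf l).length).filter
    (fun p : Nat => condB (tsOf l) ((p : Nat) : Int))).map (fun p : Nat => (p : Int)) with hL
  have hLnodup : L.Nodup := by
    refine List.Nodup.map (fun a b h => by exact_mod_cast h) ?_
    exact (List.nodup_range).filter _
  have hLmem : ∀ x : Int, x ∈ L ↔ (0 ≤ x ∧ x < ((tsOf l).length : Int) ∧ condB (tsOf l) x = true) := by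
    intro x
    rw [hL]
    simp only [List.mem_map, List.mem_filter, List.mem_range]
    constructor
    · rintro ⟨p, ⟨hp, hc⟩, rfl⟩
      exact ⟨by omega, by exact_mod_cast hp, hc⟩
    · rintro ⟨h0, hn, hc⟩
      refine ⟨x.toNat, ⟨by omega, ?_⟩, by omega⟩
      rwa [show ((x.toNat : Nat) : Int) = x from by omega]
  have hmem : ∀ x : Int, x ∈ S ↔ x ∈ L := by
    intro x
    rw [hS, mem_wfold, mem_wfold, mem_wfold,
      hrule 1 3 (by omega) (by omega) x, hrule 10 20 (by omega) (by omega) x,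
      hrule 60 60 (by omega) (by omega) x, hLmem x]
    have hemp : ¬ (x ∈ (PySem.Set.empty : PySem.Set Int)) := by
      simp [PySem.Set.empty]
    simp only [condB, decide_eq_true_eq]
    tauto
  have hperm : S.Perm L := (List.perm_ext_iff_of_nodup hSnodup hLnodup).mpr hmem
  have hlen : PySem.Set.len S = L.length := by
    rw [show PySem.Set.len S = S.length from rfl, hperm.length_eq]
  rw [hlen, hL, List.length_map, List.countP_eq_length_filter]

-- ===== VERDICT (by name: the statement is the Claim_ definition above) =====
theorem droppedRequest_spec : Claim_equal_droppedRequest := by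
  intro l _ hpre
  unfold Spec_droppedRequest
  by_cases hne : l = []
  · subst hne; rfl
  · have hpre' : l = [] ∨ ∃ x ∈ l, 0 ≤ x := hpre
    have hx : ∃ x ∈ l, 0 ≤ x := by
      rcases hpre' with h | h
      · exact absurd h hne
      · exact h
    rw [a_eq_countP l hne hx, alt_eq_countP l]
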